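-- pv_equiv track=rewrite | github.com/GabGomes16/Algoritmos-e-Logica-de-Programacao-II | trimestre-1/soma-de-valores-das-listas-recursivo.py | somaLista
-- ===== SOURCE A (Python) =====
-- def somaLista(lista, posicao):
--     tamanho = len(lista)
--     resultado = 0
--     if tamanho > posicao:
--         resultado = lista[posicao] + somaLista(lista, posicao+1)
--     else:
--         return 0
--
--     return resultado
-- ===== SOURCE B (Python) =====
-- def somaLista(lista, posicao):
--     resultado = 0
--     for i in range(posicao, len(lista)):
--         resultado += lista[i]
--     return resultado
-- ===== Notes on version B (the rewrite author's own statement) =====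
-- stated objective: simpler
-- what changed: Replaces recursion over an advancing index with a single iterative accumulator loop over range(posicao, len(lista)), keeping indexed access so negative positions behave identically.
import Mathlib
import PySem

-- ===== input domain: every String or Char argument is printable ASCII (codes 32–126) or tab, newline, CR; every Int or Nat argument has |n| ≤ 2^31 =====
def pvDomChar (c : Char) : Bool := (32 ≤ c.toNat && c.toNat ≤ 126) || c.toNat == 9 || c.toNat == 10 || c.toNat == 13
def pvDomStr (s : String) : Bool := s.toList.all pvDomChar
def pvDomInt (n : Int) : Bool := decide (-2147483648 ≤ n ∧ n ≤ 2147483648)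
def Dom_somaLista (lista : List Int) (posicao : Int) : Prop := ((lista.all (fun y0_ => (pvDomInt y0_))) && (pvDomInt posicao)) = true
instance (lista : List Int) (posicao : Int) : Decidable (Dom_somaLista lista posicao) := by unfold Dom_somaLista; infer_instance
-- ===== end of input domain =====

-- B replaces recursion over an advancing index with one iterative accumulator loop over range(posicao, len(lista)) (simpler; same cost).

-- ===== PORT A =====
-- Recursion on the advancing index; lista[posicao] ported as pyGetD (exact under Pre_, which excludes the IndexError inputs).
def somaLista (lista : List Int) (posicao : Int) : Int :=
  let tamanho : Int := lista.length
  if tamanho > posicao then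
    PySem.List.pyGetD lista posicao 0 + somaLista lista (posicao + 1)
  else
    0
termination_by ((lista.length : Int) - posicao).toNat
decreasing_by omega

-- ===== PORT B =====
def somaLista_alt (lista : List Int) (posicao : Int) : Int :=
  (PySem.List.pyRange posicao (lista.length : Int) 1).foldl
    (fun resultado i => resultado + PySem.List.pyGetD lista i 0) 0

-- ===== PRECONDITION & SPEC =====
-- Pre_ excludes exactly the inputs where Python A raises IndexError (posicao < -len(lista) with len > posicao): there both A and B raise.
def Pre_somaLista (lista : List Int) (posicao : Int) : Prop := -(lista.length : Int) ≤ posicao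
instance (lista : List Int) (posicao : Int) : Decidable (Pre_somaLista lista posicao) := by unfold Pre_somaLista; infer_instance
def pvWitness_somaLista : List Int × Int := ([3, -1, 4], -2)

def Spec_somaLista (lista : List Int) (posicao : Int) (out : Int) : Prop := out = somaLista_alt lista posicao
instance (lista : List Int) (posicao : Int) (out : Int) : Decidable (Spec_somaLista lista posicao out) := by unfold Spec_somaLista; infer_instance

-- ===== CLAIM (what is proved, stated in full; the proofs are below) =====
def Claim_equal_somaLista : Prop := ∀ (lista : List Int) (posicao : Int), Dom_somaLista lista posicao → Pre_somaLista lista posicao → Spec_somaLista lista posicao (somaLista lista posicao)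

-- ===== LEMMAS AND PROOFS =====
lemma somaLista_eq_alt (lista : List Int) : ∀ (k : Nat) (p : Int),
    ((lista.length : Int) - p).toNat = k → somaLista lista p = somaLista_alt lista p := by
  intro k
  induction k with
  | zero =>
    intro p hk
    rw [somaLista]
    simp only [somaLista_alt]
    have hnp : ¬ ((lista.length : Int) > p) := by omega
    rw [if_neg hnp, PySem.List.pyRange_one_eq_nil (by omega)]
    simp [List.foldl]
  | succ n ih =>
    intro p hk
    have hp : p < (lista.length : Int) := by omega
    rw [somaLista]
    simp only [somaLista_alt]
    rw [if_pos hp, PySem.List.pyRange_one_cons hp]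
    simp only [List.foldl]
    rw [PySem.List.foldl_add (g := fun i => PySem.List.pyGetD lista i 0),
        ih (p + 1) (by omega)]
    simp only [somaLista_alt]
    rw [PySem.List.foldl_add (g := fun i => PySem.List.pyGetD lista i 0)]
    ring

-- ===== VERDICT (by name: the statement is the Claim_ definition above) =====
theorem somaLista_spec : Claim_equal_somaLista := by
  intro lista posicao _ _
  exact somaLista_eq_alt lista _ posicao rfl
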